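-- pv_equiv track=rewrite | github.com/Alex-Kuimov/generhythm | midi.py | create_dict_sequences
-- ===== SOURCE A (Python) =====
-- def create_dict_sequences(notes):
--     pattern = []
--     patterns_dict = {}
--     pattern_id = 1
--
--     for note in notes:
--         if note != 0:
--             pattern.append(note)
--         else:
--             if pattern:
--                 pattern_str = ",".join(str(n) for n in pattern)
--
--                 if pattern_str not in patterns_dict and len(pattern_str)<=11:
--                     patterns_dict[pattern_str] = pattern_id
--                     pattern_id += 1
--                 pattern = []
--
--     return patterns_dict
-- ===== SOURCE B (Python) =====
-- def create_dict_sequences(notes):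
--     # Pass 1: collect zero-terminated runs of non-zero notes.
--     # A trailing run not followed by a 0 is deliberately dropped,
--     # matching the original's behaviour.
--     runs = []
--     cur = []
--     for note in notes:
--         if note == 0:
--             if cur:
--                 runs.append(cur)
--             cur = []
--         else:
--             cur.append(note)
--     # Pass 2: assign ids to new short patterns in order of appearance.
--     patterns_dict = {}
--     next_id = 1
--     for run in runs:
--         s = ",".join(str(n) for n in run)
--         if s not in patterns_dict and len(s) <= 11:
--             patterns_dict[s] = next_id
--             next_id += 1
--     return patterns_dict
-- ===== Notes on version B (the rewrite author's own statement) =====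
-- stated objective: alternative
-- what changed: Splits A's single interleaved loop into two phases: one pass that groups the notes into zero-terminated runs (dropping any unterminated trailing run, as A does), and a separate pass over the runs list that builds the pattern strings and assigns ids.
import Mathlib
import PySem

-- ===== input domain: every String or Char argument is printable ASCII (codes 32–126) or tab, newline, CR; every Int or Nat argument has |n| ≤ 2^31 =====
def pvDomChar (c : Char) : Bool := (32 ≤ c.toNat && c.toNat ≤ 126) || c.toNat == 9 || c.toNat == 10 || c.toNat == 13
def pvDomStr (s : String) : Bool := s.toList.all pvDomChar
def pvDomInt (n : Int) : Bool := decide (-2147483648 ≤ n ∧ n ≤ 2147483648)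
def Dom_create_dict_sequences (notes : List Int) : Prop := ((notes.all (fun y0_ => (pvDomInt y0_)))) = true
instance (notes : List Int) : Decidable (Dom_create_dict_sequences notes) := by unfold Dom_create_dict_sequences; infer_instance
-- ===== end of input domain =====

-- B is an alternative decomposition of A (two passes instead of one interleaved loop); same cost.

-- ===== PORT A =====
-- A's single loop: state = (pattern, patterns_dict, pattern_id)
def pvAStep (st : List Int × PySem.Dict String Int × Int) (note : Int) :
    List Int × PySem.Dict String Int × Int :=
  if note ≠ 0 then (st.1 ++ [note], st.2)
  else if st.1 ≠ [] then
    let pattern_str := PySem.Str.join "," (st.1.map PySem.Int.toStr)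
    if st.2.1.contains pattern_str = false ∧ PySem.Str.len pattern_str ≤ 11 then
      ([], st.2.1.insert pattern_str st.2.2, st.2.2 + 1)
    else ([], st.2)
  else st

def create_dict_sequences (notes : List Int) : List (String × Int) :=
  ((notes.foldl pvAStep ([], PySem.Dict.empty, 1)).2.1).items

-- ===== PORT B =====
-- pass 1 step: collect zero-terminated runs; state = (runs, cur)
def pvRunStep (st : List (List Int) × List Int) (note : Int) : List (List Int) × List Int :=
  if note = 0 then ((if st.2 ≠ [] then st.1 ++ [st.2] else st.1), [])
  else (st.1, st.2 ++ [note])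

-- pass 2 step: assign ids; state = (patterns_dict, next_id)
def pvAssign (st : PySem.Dict String Int × Int) (run : List Int) :
    PySem.Dict String Int × Int :=
  let s := PySem.Str.join "," (run.map PySem.Int.toStr)
  if st.1.contains s = false ∧ PySem.Str.len s ≤ 11 then
    (st.1.insert s st.2, st.2 + 1)
  else st

def create_dict_sequences_alt (notes : List Int) : List (String × Int) :=
  (((notes.foldl pvRunStep ([], [])).1).foldl pvAssign (PySem.Dict.empty, 1)).1.items

-- ===== PRECONDITION & SPEC =====
def Spec_create_dict_sequences (notes : List Int) (out : List (String × Int)) : Prop := out = create_dict_sequences_alt notes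
instance (notes : List Int) (out : List (String × Int)) : Decidable (Spec_create_dict_sequences notes out) := by unfold Spec_create_dict_sequences; infer_instance

-- ===== CLAIM (what is proved, stated in full; the proofs are below) =====
def Claim_equal_create_dict_sequences : Prop := ∀ (notes : List Int), Dom_create_dict_sequences notes → Spec_create_dict_sequences notes (create_dict_sequences notes)

-- ===== LEMMAS AND PROOFS =====

-- pass 1 with a non-empty runs accumulator = accumulator ++ pass 1 from empty
lemma pvRunStep_acc (notes : List Int) : ∀ (runs : List (List Int)) (cur : List Int),
    notes.foldl pvRunStep (runs, cur)
      = (runs ++ (notes.foldl pvRunStep ([], cur)).1, (notes.foldl pvRunStep ([], cur)).2) := by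
  induction notes with
  | nil => intro runs cur; simp
  | cons note rest ih =>
      intro runs cur
      by_cases h : note = 0
      · subst h
        by_cases hc : cur = []
        · subst hc
          have h1 : pvRunStep (runs, ([] : List Int)) 0 = (runs, []) := by simp [pvRunStep]
          have h2 : pvRunStep (([] : List (List Int)), ([] : List Int)) 0 = ([], []) := by
            simp [pvRunStep]
          simp only [List.foldl_cons, h1, h2]
          exact ih runs []
        · have h1 : pvRunStep (runs, cur) 0 = (runs ++ [cur], []) := by simp [pvRunStep, hc]
          have h2 : pvRunStep (([] : List (List Int)), cur) 0 = ([cur], []) := by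
            simp [pvRunStep, hc]
          simp only [List.foldl_cons, h1, h2]
          rw [ih (runs ++ [cur]) [], ih [cur] []]
          simp
      · have h1 : ∀ rs : List (List Int), pvRunStep (rs, cur) note = (rs, cur ++ [note]) := by
          intro rs; simp [pvRunStep, h]
        simp only [List.foldl_cons, h1]
        exact ih runs (cur ++ [note])

-- the core invariant: A's loop from state (cur, dp) computes pass 2 over the runs of the rest
lemma pvKey (notes : List Int) : ∀ (cur : List Int) (dp : PySem.Dict String Int × Int),
    (notes.foldl pvAStep (cur, dp)).2
      = ((notes.foldl pvRunStep ([], cur)).1).foldl pvAssign dp := by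
  induction notes with
  | nil => intro cur dp; simp
  | cons note rest ih =>
      intro cur dp
      by_cases h : note = 0
      · subst h
        by_cases hc : cur = []
        · subst hc
          have hA : pvAStep (([] : List Int), dp) 0 = ([], dp) := by simp [pvAStep]
          have hR : pvRunStep (([] : List (List Int)), ([] : List Int)) 0 = ([], []) := by
            simp [pvRunStep]
          simp only [List.foldl_cons, hA, hR]
          exact ih [] dp
        · have hA : pvAStep (cur, dp) 0 = ([], pvAssign dp cur) := by
            simp only [pvAStep, pvAssign]
            simp only [ne_eq, not_true_eq_false, if_false]
            split_ifs <;> rfl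
          have hR : pvRunStep (([] : List (List Int)), cur) 0 = ([cur], []) := by
            simp [pvRunStep, hc]
          simp only [List.foldl_cons, hA, hR]
          rw [ih [] (pvAssign dp cur), pvRunStep_acc rest [cur] []]
          simp
      · have hA : pvAStep (cur, dp) note = (cur ++ [note], dp) := by simp [pvAStep, h]
        have hR : pvRunStep (([] : List (List Int)), cur) note = ([], cur ++ [note]) := by
          simp [pvRunStep, h]
        simp only [List.foldl_cons, hA, hR]
        exact ih (cur ++ [note]) dp

-- ===== VERDICT (by name: the statement is the Claim_ definition above) =====
theorem create_dict_sequences_spec : Claim_equal_create_dict_sequences := by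
  intro notes _
  unfold Spec_create_dict_sequences create_dict_sequences create_dict_sequences_alt
  rw [pvKey notes [] (PySem.Dict.empty, 1)]
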